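-- pv_equiv track=rewrite | github.com/martinthebrain/dbus-shelly-evcharger | venus_evcharger/bootstrap/wizard_render.py | remove_section
-- ===== SOURCE A (Python) =====
-- def remove_section(text: str, section_name: str) -> str:
--     result: list[str] = []
--     in_section = False
--     for line in text.splitlines():
--         if _is_section_header(line):
--             in_section = line == f"[{section_name}]"
--             if in_section:
--                 continue
--         if in_section:
--             continue
--         result.append(line)
--     return "\n".join(result).rstrip() + "\n"
--
-- def _is_section_header(line: str) -> bool:
--     return line.startswith("[") and line.endswith("]")
-- ===== SOURCE B (Python) =====
-- def remove_section(text: str, section_name: str) -> str: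
--     # Partition lines into a preamble block plus one block per section header,
--     # then drop the blocks whose header matches, and flatten back.
--     blocks: list[list[str]] = []
--     cur: list[str] = []
--     for line in text.splitlines():
--         if _is_section_header(line):
--             blocks.append(cur)
--             cur = [line]
--         else:
--             cur.append(line)
--     blocks.append(cur)
--     header = f"[{section_name}]"
--     kept = [b for b in blocks if not (b and b[0] == header)]
--     flat = [line for b in kept for line in b]
--     return "\n".join(flat).rstrip() + "\n"
--
-- def _is_section_header(line: str) -> bool:
--     return line.startswith("[") and line.endswith("]")
-- ===== Notes on version B (the rewrite author's own statement) =====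
-- stated objective: alternative
-- what changed: Replaces A's boolean in_section flag single pass with a partition-into-blocks pass (preamble plus one block per header) followed by filtering out the matching blocks and flattening.
import Mathlib
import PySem

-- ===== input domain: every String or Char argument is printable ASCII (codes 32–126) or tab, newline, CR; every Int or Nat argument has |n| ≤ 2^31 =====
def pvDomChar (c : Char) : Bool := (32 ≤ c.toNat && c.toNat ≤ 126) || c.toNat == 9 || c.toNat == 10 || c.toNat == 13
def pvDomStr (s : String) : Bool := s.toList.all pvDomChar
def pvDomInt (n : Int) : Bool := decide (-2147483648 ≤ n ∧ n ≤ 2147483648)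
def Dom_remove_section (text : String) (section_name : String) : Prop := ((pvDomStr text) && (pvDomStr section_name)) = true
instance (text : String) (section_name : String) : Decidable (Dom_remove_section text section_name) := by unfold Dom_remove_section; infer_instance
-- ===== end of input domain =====

-- B partitions the lines into blocks (preamble + one per header) and filters out matching blocks,
-- instead of A's in_section boolean flag; same cost, different decomposition.

-- ===== PORT A =====
def pvIsSectionHeader (line : String) : Bool :=
  PySem.Str.startswith line "[" && PySem.Str.endswith line "]"

def remove_section (text : String) (section_name : String) : String :=
  let hdr := "[" ++ section_name ++ "]"
  let st := (PySem.Str.splitlines text).foldl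
    (fun (st : List String × Bool) line =>
      if pvIsSectionHeader line then
        if line == hdr then (st.1, true) else (st.1 ++ [line], false)
      else if st.2 then st
      else (st.1 ++ [line], st.2))
    ([], false)
  PySem.Str.rstrip (PySem.Str.join "\n" st.1) ++ "\n"

-- ===== PORT B =====
def pvBlockMatches (hdr : String) (b : List String) : Bool :=
  match b with
  | [] => false
  | h :: _ => h == hdr

def remove_section_alt (text : String) (section_name : String) : String :=
  let st := (PySem.Str.splitlines text).foldl
    (fun (st : List (List String) × List String) line =>
      if pvIsSectionHeader line then (st.1 ++ [st.2], [line])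
      else (st.1, st.2 ++ [line]))
    ([], [])
  let blocks := st.1 ++ [st.2]
  let hdr := "[" ++ section_name ++ "]"
  let kept := blocks.filter (fun b => !pvBlockMatches hdr b)
  let flat := kept.flatMap id
  PySem.Str.rstrip (PySem.Str.join "\n" flat) ++ "\n"

-- ===== PRECONDITION & SPEC =====
def Spec_remove_section (text : String) (section_name : String) (out : String) : Prop := out = remove_section_alt text section_name
instance (text : String) (section_name : String) (out : String) : Decidable (Spec_remove_section text section_name out) := by unfold Spec_remove_section; infer_instance

-- ===== CLAIM (what is proved, stated in full; the proofs are below) =====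
def Claim_equal_remove_section : Prop := ∀ (text : String) (section_name : String), Dom_remove_section text section_name → Spec_remove_section text section_name (remove_section text section_name)

-- ===== LEMMAS AND PROOFS =====

def pvFlatKept (hdr : String) (bs : List (List String)) : List String :=
  (bs.filter (fun b => !pvBlockMatches hdr b)).flatMap id

lemma pv_hdr_isheader (n : String) : pvIsSectionHeader ("[" ++ n ++ "]") = true := by
  simp only [pvIsSectionHeader, Bool.and_eq_true, PySem.Str.startswith_eq, PySem.Str.endswith_eq]
  rw [PySem.Chars.startswith_iff, PySem.Chars.endswith_iff]
  constructor
  · exact ⟨n.toList ++ [']'], by simp⟩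
  · exact ⟨'[' :: n.toList, by simp⟩

lemma pv_nonheader_ne (hdr : String) (hh : pvIsSectionHeader hdr = true)
    (l : String) (h : pvIsSectionHeader l = false) : (l == hdr) = false := by
  by_contra hne
  have : l = hdr := by
    cases hb : (l == hdr) with
    | true => exact eq_of_beq hb
    | false => exact absurd hb hne
  rw [this, hh] at h
  exact Bool.true_eq_false.mp h

lemma pvFlatKept_append (hdr : String) (xs ys : List (List String)) :
    pvFlatKept hdr (xs ++ ys) = pvFlatKept hdr xs ++ pvFlatKept hdr ys := by
  simp [pvFlatKept, List.filter_append]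

lemma pv_loop (hdr : String) (hh : pvIsSectionHeader hdr = true) :
    ∀ (L : List String) (blocks : List (List String)) (cur res : List String) (flag : Bool),
    flag = pvBlockMatches hdr cur →
    res = pvFlatKept hdr (blocks ++ [cur]) →
    (L.foldl
      (fun (st : List String × Bool) line =>
        if pvIsSectionHeader line then
          if line == hdr then (st.1, true) else (st.1 ++ [line], false)
        else if st.2 then st
        else (st.1 ++ [line], st.2))
      (res, flag)).1
    = pvFlatKept hdr
        ((L.foldl
          (fun (st : List (List String) × List String) line =>
            if pvIsSectionHeader line then (st.1 ++ [st.2], [line])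
            else (st.1, st.2 ++ [line]))
          (blocks, cur)).1
        ++ [(L.foldl
          (fun (st : List (List String) × List String) line =>
            if pvIsSectionHeader line then (st.1 ++ [st.2], [line])
            else (st.1, st.2 ++ [line]))
          (blocks, cur)).2]) := by
  intro L
  induction L with
  | nil =>
    intro blocks cur res flag hf hr
    simpa using hr
  | cons line rest ih =>
    intro blocks cur res flag hf hr
    by_cases hih : pvIsSectionHeader line = true
    · simp only [List.foldl_cons, hih, if_pos]
      by_cases hm : (line == hdr) = true
      · rw [hm]
        apply ih (blocks ++ [cur]) [line]
        · simp [pvBlockMatches, hm]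
        · rw [pvFlatKept_append, hr]
          simp [pvFlatKept, pvBlockMatches, hm]
      · rw [Bool.not_eq_true] at hm
        rw [hm]
        apply ih (blocks ++ [cur]) [line]
        · simp [pvBlockMatches, hm]
        · rw [pvFlatKept_append, hr]
          simp [pvFlatKept, pvBlockMatches, hm]
    · rw [Bool.not_eq_true] at hih
      simp only [List.foldl_cons, hih, Bool.false_eq_true, if_false]
      have hne : (line == hdr) = false := pv_nonheader_ne hdr hh line hih
      have hcur : pvBlockMatches hdr (cur ++ [line]) = pvBlockMatches hdr cur := by
        cases cur with
        | nil => simp [pvBlockMatches, hne]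
        | cons h t => simp [pvBlockMatches]
      by_cases hfl : flag = true
      · rw [hfl]
        simp only [if_pos]
        apply ih blocks (cur ++ [line])
        · rw [hcur, ← hf, hfl]
        · rw [hr, pvFlatKept_append, pvFlatKept_append]
          have : pvBlockMatches hdr cur = true := by rw [← hf, hfl]
          simp [pvFlatKept, this, hcur]
      · rw [Bool.not_eq_true] at hfl
        rw [hfl]
        simp only [Bool.false_eq_true, if_false]
        apply ih blocks (cur ++ [line])
        · rw [hcur, ← hf, hfl]
        · rw [hr, pvFlatKept_append, pvFlatKept_append]
          have : pvBlockMatches hdr cur = false := by rw [← hf, hfl]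
          simp [pvFlatKept, this, hcur]

-- ===== VERDICT (by name: the statement is the Claim_ definition above) =====
theorem remove_section_spec : Claim_equal_remove_section := by
  intro text section_name _
  unfold Spec_remove_section remove_section remove_section_alt
  have h := pv_loop ("[" ++ section_name ++ "]") (pv_hdr_isheader section_name)
    (PySem.Str.splitlines text) [] [] [] false (by simp [pvBlockMatches])
    (by simp [pvFlatKept, pvBlockMatches])
  simp only []
  rw [h]
  rfl
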